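-- pv_equiv track=rewrite | github.com/MoraHol/dataStructure-course | Projects Python FED/InteriorRombo/InteriorRombo.py | RomboImpares
-- ===== SOURCE A (Python) =====
-- def InicializacionMatriz(m):
--     """
--     inicializa la matriz en 0 con el tamaño m
--     :param m: tamaño de la matriz
--     :return: la matriz en 0
--     """
--     matriz = []
--     for x in range(0, m):
--         matriz.append([0] * m)
--
--     return matriz
--
-- def RomboImpares(matriz, m):
--     """
--     función para guardar los valores del interior de un rombo con tamaño impar
--     :param matriz: es la matriz de donde se escogerán los números
--     :param m: es el tamaño de la matriz
--     :return: una matriz que solo tiene los números que conforman el interior de un rombo impar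
--     """
--     k = int(matriz.__len__() / 2)
--     u = k - 1
--     # inicializando la matriz para alojar las posiciones dentro del rombo
--     matriz2 = InicializacionMatriz(m)
--     # dividir matriz en 4 nuevas matrices y sacando diagonales
--     for i in range(0, k):  # aloja la diagonal superior izquierda
--         for j in range(u + 1, k):
--             matriz2[i][j] = matriz[i][j]
--         u -= 1
--
--     u = 0
--     for i in range(k, matriz.__len__()):  # aloja la diagonal inferior izquierda
--         for j in range(u, k):
--             matriz2[i][j] = matriz[i][j]
--         u += 1
--
--     u = k + 1
--     for i in range(0, k):  # aloja la diagonal superior derecha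
--         for j in range(k, u):
--             matriz2[i][j] = matriz[i][j]
--         u += 1
--
--     u = matriz.__len__()
--     for i in range(k, matriz.__len__()):  # aloja la diagonal inferior derecha
--         for j in range(k, u):
--             matriz2[i][j] = matriz[i][j]
--         u -= 1
--
--     return matriz2
-- ===== SOURCE B (Python) =====
-- def InicializacionMatriz(m):
--     """inicializa la matriz en 0 con el tamaño m"""
--     return [[0] * m for _ in range(m)]
--
-- def RomboImpares(matriz, m):
--     """Copia el interior del rombo con un solo doble recorrido:
--     la celda (i, j) pertenece al rombo sii abs(i-k) + abs(j-k) <= k."""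
--     n = len(matriz)
--     k = n // 2
--     matriz2 = InicializacionMatriz(m)
--     for i in range(n):
--         for j in range(n):
--             if abs(i - k) + abs(j - k) <= k:
--                 matriz2[i][j] = matriz[i][j]
--     return matriz2
-- ===== Notes on version B (the rewrite author's own statement) =====
-- stated objective: simpler
-- what changed: Replaces A's four corner loops with running u-counters by a single uniform double scan that copies a cell exactly when it satisfies the rhombus membership test |i-k|+|j-k| <= k; Pre_ restricts to the function's natural domain (odd-size matrices, plus the trivially agreeing sizes 0-3), excluding even sizes >= 4 where A's clipped loops accidentally skip the anti-diagonal i+j = 3k of the symmetric rhombus.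
import Mathlib
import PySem

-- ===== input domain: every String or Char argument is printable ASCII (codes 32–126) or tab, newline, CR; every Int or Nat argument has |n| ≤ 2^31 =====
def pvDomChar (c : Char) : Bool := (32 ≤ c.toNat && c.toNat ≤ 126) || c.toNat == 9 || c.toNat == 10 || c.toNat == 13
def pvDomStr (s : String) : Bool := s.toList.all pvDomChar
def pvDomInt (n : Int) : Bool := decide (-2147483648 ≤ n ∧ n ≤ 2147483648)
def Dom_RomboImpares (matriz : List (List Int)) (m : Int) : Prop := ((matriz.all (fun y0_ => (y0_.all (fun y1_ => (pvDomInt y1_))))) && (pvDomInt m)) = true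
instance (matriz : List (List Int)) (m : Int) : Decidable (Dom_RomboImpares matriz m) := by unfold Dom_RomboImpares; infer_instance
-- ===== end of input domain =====

-- B replaces A's four corner loops (each with a running u counter) by one uniform
-- double scan copying a cell iff it passes the rhombus membership test; objective: simpler.

-- `matriz2[i][j] = matriz[i][j]` for 0 ≤ i, j (the only indices the loops produce);
-- exact inside Pre_ (all touched cells in range); List.set is a no-op out of range where Python raises.
def pvWrite (src : List (List Int)) (m2 : List (List Int)) (i j : Int) : List (List Int) :=
  m2.set i.toNat ((m2.getD i.toNat []).set j.toNat ((src.getD i.toNat []).getD j.toNat 0))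

-- ===== PORT A =====
def InicializacionMatriz (m : Int) : List (List Int) :=
  (PySem.List.pyRange 0 m 1).foldl (fun acc _ => acc ++ [List.replicate m.toNat 0]) []

def RomboImpares (matriz : List (List Int)) (m : Int) : List (List Int) :=
  let k : Nat := matriz.length / 2          -- k = int(len(matriz) / 2)
  let matriz2 := InicializacionMatriz m
  -- upper-left corner loop: u starts at k - 1 and decreases
  let s1 := (PySem.List.pyRange 0 (k : Int) 1).foldl
      (fun (s : List (List Int) × Int) i =>
        ((PySem.List.pyRange (s.2 + 1) (k : Int) 1).foldl (fun m2 j => pvWrite matriz m2 i j) s.1,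
         s.2 - 1))
      (matriz2, (k : Int) - 1)
  -- lower-left corner loop: u restarts at 0 and increases
  let s2 := (PySem.List.pyRange (k : Int) (matriz.length : Int) 1).foldl
      (fun (s : List (List Int) × Int) i =>
        ((PySem.List.pyRange s.2 (k : Int) 1).foldl (fun m2 j => pvWrite matriz m2 i j) s.1,
         s.2 + 1))
      (s1.1, 0)
  -- upper-right corner loop: u restarts at k + 1 and increases
  let s3 := (PySem.List.pyRange 0 (k : Int) 1).foldl
      (fun (s : List (List Int) × Int) i =>
        ((PySem.List.pyRange (k : Int) s.2 1).foldl (fun m2 j => pvWrite matriz m2 i j) s.1,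
         s.2 + 1))
      (s2.1, (k : Int) + 1)
  -- lower-right corner loop: u restarts at len(matriz) and decreases
  let s4 := (PySem.List.pyRange (k : Int) (matriz.length : Int) 1).foldl
      (fun (s : List (List Int) × Int) i =>
        ((PySem.List.pyRange (k : Int) s.2 1).foldl (fun m2 j => pvWrite matriz m2 i j) s.1,
         s.2 - 1))
      (s3.1, (matriz.length : Int))
  s4.1

-- ===== PORT B =====
def RomboImpares_alt (matriz : List (List Int)) (m : Int) : List (List Int) :=
  let n : Nat := matriz.length
  let k : Nat := n / 2
  let matriz2 := (PySem.List.pyRange 0 m 1).map (fun _ => List.replicate m.toNat 0)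
  (PySem.List.pyRange 0 (n : Int) 1).foldl
    (fun m2 i =>
      (PySem.List.pyRange 0 (n : Int) 1).foldl
        (fun m2 j =>
          if |i - (k : Int)| + |j - (k : Int)| ≤ (k : Int)
          then pvWrite matriz m2 i j else m2)
        m2)
    matriz2

-- ===== PRECONDITION & SPEC =====
-- Pre_ restricts to the function's natural domain: odd-size matrices (the docstring's
-- "rombo impar"), plus the sizes < 4 on which A and B trivially coincide; even sizes ≥ 4
-- are excluded because there A's clipped corner loops accidentally skip the anti-diagonal
-- i+j = 3k of the symmetric rhombus, an artefact B does not reproduce.  It also requires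
-- every rhombus cell to be writable in the m×m output and readable from its (possibly
-- ragged) input row — exactly where the Python otherwise raises IndexError.
def Pre_RomboImpares (matriz : List (List Int)) (m : Int) : Prop :=
  (matriz.length % 2 = 1 ∨ matriz.length < 4) ∧
  ∀ i : Nat, i < matriz.length → ∀ j : Nat, j < matriz.length →
    (|(i : Int) - (matriz.length / 2 : Nat)| + |(j : Int) - (matriz.length / 2 : Nat)| ≤ ((matriz.length / 2 : Nat) : Int)) →
    ((i : Int) < m ∧ (j : Int) < m ∧ j < (matriz.getD i []).length)
instance (matriz : List (List Int)) (m : Int) : Decidable (Pre_RomboImpares matriz m) := by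
  unfold Pre_RomboImpares; infer_instance

def pvWitness_RomboImpares : List (List Int) × Int := ([[1, 2, 3], [4, 5, 6], [7, 8, 9]], 3)

def Spec_RomboImpares (matriz : List (List Int)) (m : Int) (out : List (List Int)) : Prop := out = RomboImpares_alt matriz m
instance (matriz : List (List Int)) (m : Int) (out : List (List Int)) : Decidable (Spec_RomboImpares matriz m out) := by unfold Spec_RomboImpares; infer_instance

-- ===== CLAIM (what is proved, stated in full; the proofs are below) =====
def Claim_equal_RomboImpares : Prop := ∀ (matriz : List (List Int)) (m : Int), Dom_RomboImpares matriz m → Pre_RomboImpares matriz m → Spec_RomboImpares matriz m (RomboImpares matriz m)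

-- ===== LEMMAS AND PROOFS =====

-- the (i, j) entry of a matrix, as an Option (none = out of range)
def pvE (m2 : List (List Int)) (i j : Nat) : Option Int := m2[i]?.bind (fun r => r[j]?)

-- a single write, as a function of the index pair
def pvW (src : List (List Int)) (m2 : List (List Int)) (p : Int × Int) : List (List Int) :=
  pvWrite src m2 p.1 p.2

-- the four corner-loop index sets of A, and the scan index set of B
def pvUL (k : Int) : List (Int × Int) :=
  (PySem.List.pyRange 0 k 1).flatMap (fun i => (PySem.List.pyRange (k - i) k 1).map (fun j => (i, j)))
def pvLL (n k : Int) : List (Int × Int) :=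
  (PySem.List.pyRange k n 1).flatMap (fun i => (PySem.List.pyRange (i - k) k 1).map (fun j => (i, j)))
def pvUR (k : Int) : List (Int × Int) :=
  (PySem.List.pyRange 0 k 1).flatMap (fun i => (PySem.List.pyRange k (k + 1 + i) 1).map (fun j => (i, j)))
def pvLR (n k : Int) : List (Int × Int) :=
  (PySem.List.pyRange k n 1).flatMap (fun i => (PySem.List.pyRange k (n - i + k) 1).map (fun j => (i, j)))
def pvA (n k : Int) : List (Int × Int) := pvUL k ++ pvLL n k ++ pvUR k ++ pvLR n k
def pvB (n k : Int) : List (Int × Int) :=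
  (PySem.List.pyRange 0 n 1).flatMap (fun i =>
    ((PySem.List.pyRange 0 n 1).filter
      (fun j => decide (|i - k| + |j - k| ≤ k))).map (fun j => (i, j)))

theorem pvE_pvWrite (src m2 : List (List Int)) (a b : Int) (ha : 0 ≤ a) (hb : 0 ≤ b)
    (i j : Nat) :
    pvE (pvWrite src m2 a b) i j =
      if a = (i : Int) ∧ b = (j : Int) ∧ (pvE m2 i j).isSome
      then some ((src.getD i []).getD j 0) else pvE m2 i j := by
  have hai : a.toNat = i ↔ a = (i : Int) := by omega
  have hbj : b.toNat = j ↔ b = (j : Int) := by omega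
  unfold pvWrite pvE
  simp only [List.getElem?_set, List.getD_eq_getElem?_getD]
  split_ifs with h1 h2 h3 <;>
    simp_all [List.getElem?_set, isSome_getElem?, Option.getD]

theorem pvShape_pvWrite (src m2 : List (List Int)) (a b : Int) :
    (pvWrite src m2 a b).map List.length = m2.map List.length := by
  unfold pvWrite
  by_cases h : a.toNat < m2.length
  · rw [List.map_set]
    apply List.ext_getElem?
    intro n
    rw [List.getElem?_set]
    by_cases hn : a.toNat = n
    · subst hn
      simp [List.length_set, h, List.getD_eq_getElem?_getD]
    · simp [hn]
  · rw [List.set_eq_of_length_le (by omega)]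

theorem pvIsSome_pvWrite (src m2 : List (List Int)) (a b : Int) (i j : Nat) :
    (pvE (pvWrite src m2 a b) i j).isSome = (pvE m2 i j).isSome := by
  have h := pvShape_pvWrite src m2 a b
  unfold pvE
  rcases h1 : (pvWrite src m2 a b)[i]? with _ | r
  · have : m2[i]? = none := by
      rw [List.getElem?_eq_none_iff] at h1 ⊢
      calc m2.length = (m2.map List.length).length := by simp
        _ = ((pvWrite src m2 a b).map List.length).length := by rw [h]
        _ = (pvWrite src m2 a b).length := by simp
        _ ≤ i := h1
    simp [this]
  · rcases h2 : m2[i]? with _ | r'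
    · exfalso
      rw [List.getElem?_eq_none_iff] at h2
      have : i < (pvWrite src m2 a b).length := (List.getElem?_eq_some_iff.mp h1).1
      have hl : (pvWrite src m2 a b).length = m2.length := by
        have := congrArg List.length h; simpa using this
      omega
    · simp only [Option.bind_some]
      have : r.length = r'.length := by
        have e1 : ((pvWrite src m2 a b).map List.length)[i]? = some r.length := by
          rw [List.getElem?_map, h1]; rfl
        have e2 : (m2.map List.length)[i]? = some r'.length := by
          rw [List.getElem?_map, h2]; rfl
        rw [h] at e1; rw [e1] at e2; exact Option.some_inj.mp e2
      apply Bool.eq_iff_iff.mpr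
      simp [isSome_getElem?, this]

theorem pvE_foldl (src : List (List Int)) (ps : List (Int × Int))
    (hps : ∀ p ∈ ps, 0 ≤ p.1 ∧ 0 ≤ p.2) (m2 : List (List Int)) (i j : Nat) :
    pvE (ps.foldl (pvW src) m2) i j =
      if ((i : Int), (j : Int)) ∈ ps ∧ (pvE m2 i j).isSome
      then some ((src.getD i []).getD j 0) else pvE m2 i j := by
  induction ps generalizing m2 with
  | nil => simp
  | cons p t ih =>
    obtain ⟨p1, p2⟩ := p
    have hp := hps (p1, p2) (List.mem_cons_self ..)
    rw [List.foldl_cons, ih (fun q hq => hps q (List.mem_cons_of_mem _ hq))]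
    simp only [pvW]
    rw [pvIsSome_pvWrite, pvE_pvWrite src m2 p1 p2 hp.1 hp.2]
    have hcomm : (((i : Int), (j : Int)) = (p1, p2)) ↔ (p1 = (i : Int) ∧ p2 = (j : Int)) := by
      constructor
      · intro h; cases h; exact ⟨rfl, rfl⟩
      · rintro ⟨h1, h2⟩; rw [h1, h2]
    by_cases hS : (pvE m2 i j).isSome
    · by_cases hmem : ((i : Int), (j : Int)) ∈ t
      · simp [List.mem_cons, hmem, hS]
      · simp only [List.mem_cons, hmem, or_false, hS, and_true]
        simp only [hcomm]
        simp
    · simp [hS, List.mem_cons]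

theorem pvShape_foldl (src : List (List Int)) (ps : List (Int × Int)) (m2 : List (List Int)) :
    (ps.foldl (pvW src) m2).map List.length = m2.map List.length := by
  induction ps generalizing m2 with
  | nil => rfl
  | cons p t ih => rw [List.foldl_cons, ih, pvW, pvShape_pvWrite]

theorem pv_ext_of_E (x y : List (List Int))
    (hshape : x.map List.length = y.map List.length)
    (hE : ∀ i j, pvE x i j = pvE y i j) : x = y := by
  induction x generalizing y with
  | nil => cases y with
    | nil => rfl
    | cons b ys => simp at hshape
  | cons a xs ih =>
    cases y with
    | nil => simp at hshape
    | cons b ys =>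
      simp only [List.map_cons, List.cons.injEq] at hshape
      have hhead : a = b := by
        apply List.ext_getElem? (fun j => ?_)
        have := hE 0 j
        simpa [pvE] using this
      have htail : xs = ys := by
        apply ih _ hshape.2
        intro i j
        have := hE (i + 1) j
        simpa [pvE] using this
      rw [hhead, htail]

-- A's four loops, with their running u counter, as folds over their index-pair lists
theorem pvLoop1 (src : List (List Int)) (k : Int) :
    ∀ (c : Nat) (a : Int) (mat : List (List Int)), (k - a).toNat = c →
    ((PySem.List.pyRange a k 1).foldl
      (fun (s : List (List Int) × Int) i =>
        ((PySem.List.pyRange (s.2 + 1) k 1).foldl (fun m2 j => pvWrite src m2 i j) s.1, s.2 - 1))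
      (mat, k - 1 - a)).1
    = ((PySem.List.pyRange a k 1).flatMap
        (fun i => (PySem.List.pyRange (k - i) k 1).map (fun j => (i, j)))).foldl (pvW src) mat := by
  intro c
  induction c with
  | zero =>
    intro a mat h
    rw [PySem.List.pyRange_one_eq_nil (by omega)]
    rfl
  | succ c ih =>
    intro a mat h
    rw [PySem.List.pyRange_one_cons (by omega), List.foldl_cons, List.flatMap_cons,
      List.foldl_append, List.foldl_map]
    have e1 : k - 1 - a + 1 = k - a := by ring
    have e2 : k - 1 - a - 1 = k - 1 - (a + 1) := by ring
    rw [e1, e2, ih (a + 1) _ (by omega)]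
    rfl

theorem pvLoop2 (src : List (List Int)) (n k : Int) :
    ∀ (c : Nat) (a : Int) (mat : List (List Int)), (n - a).toNat = c →
    ((PySem.List.pyRange a n 1).foldl
      (fun (s : List (List Int) × Int) i =>
        ((PySem.List.pyRange s.2 k 1).foldl (fun m2 j => pvWrite src m2 i j) s.1, s.2 + 1))
      (mat, a - k)).1
    = ((PySem.List.pyRange a n 1).flatMap
        (fun i => (PySem.List.pyRange (i - k) k 1).map (fun j => (i, j)))).foldl (pvW src) mat := by
  intro c
  induction c with
  | zero =>
    intro a mat h
    rw [PySem.List.pyRange_one_eq_nil (by omega)]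
    rfl
  | succ c ih =>
    intro a mat h
    rw [PySem.List.pyRange_one_cons (by omega), List.foldl_cons, List.flatMap_cons,
      List.foldl_append, List.foldl_map]
    have e2 : a - k + 1 = a + 1 - k := by ring
    rw [e2, ih (a + 1) _ (by omega)]
    rfl

theorem pvLoop3 (src : List (List Int)) (k : Int) :
    ∀ (c : Nat) (a : Int) (mat : List (List Int)), (k - a).toNat = c →
    ((PySem.List.pyRange a k 1).foldl
      (fun (s : List (List Int) × Int) i =>
        ((PySem.List.pyRange k s.2 1).foldl (fun m2 j => pvWrite src m2 i j) s.1, s.2 + 1))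
      (mat, k + 1 + a)).1
    = ((PySem.List.pyRange a k 1).flatMap
        (fun i => (PySem.List.pyRange k (k + 1 + i) 1).map (fun j => (i, j)))).foldl (pvW src) mat := by
  intro c
  induction c with
  | zero =>
    intro a mat h
    rw [PySem.List.pyRange_one_eq_nil (by omega)]
    rfl
  | succ c ih =>
    intro a mat h
    rw [PySem.List.pyRange_one_cons (by omega), List.foldl_cons, List.flatMap_cons,
      List.foldl_append, List.foldl_map]
    have e2 : k + 1 + a + 1 = k + 1 + (a + 1) := by ring
    rw [e2, ih (a + 1) _ (by omega)]
    rfl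

theorem pvLoop4 (src : List (List Int)) (n k : Int) :
    ∀ (c : Nat) (a : Int) (mat : List (List Int)), (n - a).toNat = c →
    ((PySem.List.pyRange a n 1).foldl
      (fun (s : List (List Int) × Int) i =>
        ((PySem.List.pyRange k s.2 1).foldl (fun m2 j => pvWrite src m2 i j) s.1, s.2 - 1))
      (mat, n - a + k)).1
    = ((PySem.List.pyRange a n 1).flatMap
        (fun i => (PySem.List.pyRange k (n - i + k) 1).map (fun j => (i, j)))).foldl (pvW src) mat := by
  intro c
  induction c with
  | zero =>
    intro a mat h
    rw [PySem.List.pyRange_one_eq_nil (by omega)]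
    rfl
  | succ c ih =>
    intro a mat h
    rw [PySem.List.pyRange_one_cons (by omega), List.foldl_cons, List.flatMap_cons,
      List.foldl_append, List.foldl_map]
    have e2 : n - a + k - 1 = n - (a + 1) + k := by ring
    rw [e2, ih (a + 1) _ (by omega)]
    rfl

-- the same four lemmas at the start values A uses
theorem pvLoop1' (src : List (List Int)) (k : Int) (mat : List (List Int)) :
    ((PySem.List.pyRange 0 k 1).foldl
      (fun (s : List (List Int) × Int) i =>
        ((PySem.List.pyRange (s.2 + 1) k 1).foldl (fun m2 j => pvWrite src m2 i j) s.1, s.2 - 1))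
      (mat, k - 1)).1
    = ((PySem.List.pyRange 0 k 1).flatMap
        (fun i => (PySem.List.pyRange (k - i) k 1).map (fun j => (i, j)))).foldl (pvW src) mat := by
  have h := pvLoop1 src k (k - 0).toNat 0 mat rfl
  rw [sub_zero] at h
  exact h

theorem pvLoop2' (src : List (List Int)) (n k : Int) (mat : List (List Int)) :
    ((PySem.List.pyRange k n 1).foldl
      (fun (s : List (List Int) × Int) i =>
        ((PySem.List.pyRange s.2 k 1).foldl (fun m2 j => pvWrite src m2 i j) s.1, s.2 + 1))
      (mat, 0)).1
    = ((PySem.List.pyRange k n 1).flatMap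
        (fun i => (PySem.List.pyRange (i - k) k 1).map (fun j => (i, j)))).foldl (pvW src) mat := by
  have h := pvLoop2 src n k (n - k).toNat k mat rfl
  rw [sub_self] at h
  exact h

theorem pvLoop3' (src : List (List Int)) (k : Int) (mat : List (List Int)) :
    ((PySem.List.pyRange 0 k 1).foldl
      (fun (s : List (List Int) × Int) i =>
        ((PySem.List.pyRange k s.2 1).foldl (fun m2 j => pvWrite src m2 i j) s.1, s.2 + 1))
      (mat, k + 1)).1
    = ((PySem.List.pyRange 0 k 1).flatMap
        (fun i => (PySem.List.pyRange k (k + 1 + i) 1).map (fun j => (i, j)))).foldl (pvW src) mat := by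
  have h := pvLoop3 src k (k - 0).toNat 0 mat rfl
  rw [add_zero] at h
  exact h

theorem pvLoop4' (src : List (List Int)) (n k : Int) (mat : List (List Int)) :
    ((PySem.List.pyRange k n 1).foldl
      (fun (s : List (List Int) × Int) i =>
        ((PySem.List.pyRange k s.2 1).foldl (fun m2 j => pvWrite src m2 i j) s.1, s.2 - 1))
      (mat, n)).1
    = ((PySem.List.pyRange k n 1).flatMap
        (fun i => (PySem.List.pyRange k (n - i + k) 1).map (fun j => (i, j)))).foldl (pvW src) mat := by
  have h := pvLoop4 src n k (n - k).toNat k mat rfl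
  rw [sub_add_cancel] at h
  exact h

-- A as one fold over its combined index-pair list
theorem pvA_eq (matriz : List (List Int)) (m : Int) :
    RomboImpares matriz m =
      (pvA (matriz.length : Int) ((matriz.length / 2 : Nat) : Int)).foldl (pvW matriz)
        (InicializacionMatriz m) := by
  unfold RomboImpares pvA pvUL pvLL pvUR pvLR
  simp only []
  rw [List.foldl_append, List.foldl_append, List.foldl_append]
  rw [pvLoop1' matriz ((matriz.length / 2 : Nat) : Int) (InicializacionMatriz m)]
  rw [pvLoop2' matriz (matriz.length : Int) ((matriz.length / 2 : Nat) : Int)]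
  rw [pvLoop3' matriz ((matriz.length / 2 : Nat) : Int)]
  rw [pvLoop4' matriz (matriz.length : Int) ((matriz.length / 2 : Nat) : Int)]

-- B as one fold over its index-pair list
theorem pvB_eq (matriz : List (List Int)) (m : Int) :
    RomboImpares_alt matriz m =
      (pvB (matriz.length : Int) ((matriz.length / 2 : Nat) : Int)).foldl (pvW matriz)
        ((PySem.List.pyRange 0 m 1).map (fun _ => List.replicate m.toNat 0)) := by
  unfold RomboImpares_alt pvB
  simp only []
  rw [List.foldl_flatMap]
  apply PySem.List.foldl_congr_mem
  intro mat i _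
  rw [List.foldl_map, List.foldl_filter]
  apply PySem.List.foldl_congr_mem
  intro m2 j _
  simp [pvW]

-- on odd sizes (and the trivial sizes < 4) the two index sets coincide
theorem pvMem_A_iff_B (n2 : Nat) (hpar : n2 % 2 = 1 ∨ n2 < 4) (x y : Int) :
    ((x, y) ∈ pvA (n2 : Int) ((n2 / 2 : Nat) : Int)) ↔ ((x, y) ∈ pvB (n2 : Int) ((n2 / 2 : Nat) : Int)) := by
  have hk : n2 = 2 * (n2 / 2) ∨ n2 = 2 * (n2 / 2) + 1 := by omega
  unfold pvA pvUL pvLL pvUR pvLR pvB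
  simp only [List.mem_append, List.mem_flatMap, List.mem_map, List.mem_filter,
    PySem.List.mem_pyRange_one, Prod.mk.injEq, decide_eq_true_eq]
  constructor
  · rintro (((⟨i, hi, j, hj, hx, hy⟩ | ⟨i, hi, j, hj, hx, hy⟩) | ⟨i, hi, j, hj, hx, hy⟩) | ⟨i, hi, j, hj, hx, hy⟩) <;>
      refine ⟨i, by omega, j, ⟨by omega, ?_⟩, hx, hy⟩ <;>
      rw [Int.abs_eq_natAbs, Int.abs_eq_natAbs] <;> omega
  · rintro ⟨i, hi, j, ⟨hj, hc⟩, hx, hy⟩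
    rw [Int.abs_eq_natAbs, Int.abs_eq_natAbs] at hc
    subst hx
    subst hy
    by_cases h1 : i < ((n2 / 2 : Nat) : Int) <;> by_cases h2 : j < ((n2 / 2 : Nat) : Int)
    · exact Or.inl (Or.inl (Or.inl ⟨i, by omega, j, by omega, rfl, rfl⟩))
    · exact Or.inl (Or.inr ⟨i, by omega, j, by omega, rfl, rfl⟩)
    · exact Or.inl (Or.inl (Or.inr ⟨i, by omega, j, by omega, rfl, rfl⟩))
    · exact Or.inr ⟨i, by omega, j, by omega, rfl, rfl⟩

theorem pv_nonneg_A (n2 : Nat) (p : Int × Int) (hp : p ∈ pvA (n2 : Int) ((n2 / 2 : Nat) : Int)) :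
    0 ≤ p.1 ∧ 0 ≤ p.2 := by
  obtain ⟨x, y⟩ := p
  unfold pvA pvUL pvLL pvUR pvLR at hp
  simp only [List.mem_append, List.mem_flatMap, List.mem_map,
    PySem.List.mem_pyRange_one, Prod.mk.injEq] at hp
  rcases hp with (((⟨i, hi, j, hj, hx, hy⟩ | ⟨i, hi, j, hj, hx, hy⟩) | ⟨i, hi, j, hj, hx, hy⟩) | ⟨i, hi, j, hj, hx, hy⟩) <;> subst hx <;> subst hy <;>
    constructor <;> omega

theorem pv_nonneg_B (n2 : Nat) (p : Int × Int) (hp : p ∈ pvB (n2 : Int) ((n2 / 2 : Nat) : Int)) :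
    0 ≤ p.1 ∧ 0 ≤ p.2 := by
  obtain ⟨x, y⟩ := p
  unfold pvB at hp
  simp only [List.mem_flatMap, List.mem_map, List.mem_filter,
    PySem.List.mem_pyRange_one, Prod.mk.injEq] at hp
  obtain ⟨i, hi, j, ⟨hj, _⟩, rfl, rfl⟩ := hp
  exact ⟨hi.1, hj.1⟩

-- ===== VERDICT (by name: the statement is the Claim_ definition above) =====
theorem RomboImpares_spec : Claim_equal_RomboImpares := by
  intro matriz m _ hpre
  unfold Spec_RomboImpares
  rw [pvA_eq, pvB_eq]
  have hzero : InicializacionMatriz m =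
      (PySem.List.pyRange 0 m 1).map (fun _ => List.replicate m.toNat 0) := by
    unfold InicializacionMatriz
    rw [PySem.List.foldl_append_singleton_eq_map (fun _ => List.replicate m.toNat 0)]
    rfl
  rw [hzero]
  apply pv_ext_of_E
  · rw [pvShape_foldl, pvShape_foldl]
  · intro i j
    rw [pvE_foldl matriz _ (pv_nonneg_A matriz.length), pvE_foldl matriz _ (pv_nonneg_B matriz.length)]
    rw [if_congr (and_congr_left' (pvMem_A_iff_B matriz.length hpre.1 (i : Int) (j : Int))) rfl rfl]
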